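-- pv_equiv track=rewrite | github.com/steffitan23/Warn | API/text_analysis.py | unwanted_words_check
-- ===== SOURCE A (Python) =====
-- def unwanted_words_check(text, unwanted_words):
--
-- 	def diff(start, goal, tries=0, limit = 5):
-- 		if tries > limit:
-- 			return limit + 1
-- 		if start == "" or goal == "":
-- 			return max(len(start), len(goal)) + tries
-- 		if start[0] == goal[0]:
--             # equality is just free replacement
-- 			return diff(start[1:], goal[1:], tries)
--
-- 		return min(
--         	diff(start[1:], goal, tries + 1),  # deletion
--             diff(start, goal[1:], tries + 1),  # insertion
--             diff(start[1:], goal[1:], tries + 1),  # replacement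
--             diff(start[2:], goal[2:], tries + 1) #transposition?
--         )
--
--
-- 	for word in text.split():
-- 		if word in unwanted_words:
-- 			return True
-- 		for w in unwanted_words:
-- 			if diff(word, w) < 2:
-- 				return True
--
-- 	return False
-- ===== SOURCE B (Python) =====
-- def unwanted_words_check(text, unwanted_words):
--     # strip the common prefix, then A's "distance < 2" test reduces to four equality checks
--     def within1(a, b):
--         i = 0
--         while i < len(a) and i < len(b) and a[i] == b[i]:
--             i += 1
--         a, b = a[i:], b[i:]
--         if not a or not b:
--             return max(len(a), len(b)) <= 1
--         return a[1:] == b or a == b[1:] or a[1:] == b[1:] or a[2:] == b[2:]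
--
--     return any(within1(word, w) for word in text.split() for w in unwanted_words)
-- ===== Notes on version B (the rewrite author's own statement) =====
-- stated objective: faster
-- what changed: A's budgeted edit-distance test (a 4-way exponential recursion per word pair, only its '< 2' outcome used) is replaced by stripping the common prefix and checking four slice equalities (distance <= 1 directly).
import Mathlib
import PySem

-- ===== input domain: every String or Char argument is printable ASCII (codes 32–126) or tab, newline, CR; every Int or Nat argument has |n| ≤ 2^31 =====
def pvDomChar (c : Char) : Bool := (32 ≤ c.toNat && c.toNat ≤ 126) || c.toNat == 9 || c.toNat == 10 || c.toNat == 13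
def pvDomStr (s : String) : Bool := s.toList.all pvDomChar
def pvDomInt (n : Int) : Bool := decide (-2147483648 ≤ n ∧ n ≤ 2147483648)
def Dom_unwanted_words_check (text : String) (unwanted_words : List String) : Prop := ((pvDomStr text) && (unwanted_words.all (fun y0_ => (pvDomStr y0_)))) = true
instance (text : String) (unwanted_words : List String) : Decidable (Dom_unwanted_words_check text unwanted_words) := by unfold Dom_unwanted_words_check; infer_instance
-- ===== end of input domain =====

-- B replaces A's exponential bounded-edit-distance recursion per word pair by a linear
-- common-prefix strip followed by four slice-equality checks (objective: faster).


-- ===== PORT A =====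
-- A's inner `diff(start, goal, tries=0, limit=5)`, transliterated over List Char.
-- Python's min(a, b, c, d) = min(min(min(a, b), c), d).
def diffA : List Char → List Char → Int → Int → Int
  | s, g, tries, limit =>
    if tries > limit then limit + 1
    else match s, g with
      | [], g => (g.length : Int) + tries          -- max(len "", len g) = len g
      | s, [] => (s.length : Int) + tries
      | c :: s', d :: g' =>
        if c = d then diffA s' g' tries limit
        else
          min (min (min (diffA s' (d :: g') (tries + 1) limit)
                        (diffA (c :: s') g' (tries + 1) limit))
                   (diffA s' g' (tries + 1) limit))
              (diffA s'.tail g'.tail (tries + 1) limit)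
  termination_by s g _ _ => s.length + g.length
  decreasing_by
    all_goals (simp only [List.length_cons, List.length_tail]; omega)

-- `for word in text.split(): if word in unwanted_words: return True; for w in …: if diff(word,w) < 2: return True`
def unwanted_words_check (text : String) (unwanted_words : List String) : Bool :=
  (PySem.Str.split₀ text).any (fun word =>
    unwanted_words.contains word
    || unwanted_words.any (fun w => diffA word.toList w.toList 0 5 < 2))

-- ===== PORT B =====
-- B's while-loop stripping the common prefix.
def stripCP : List Char → List Char → List Char × List Char
  | c :: s, d :: g => if c = d then stripCP s g else (c :: s, d :: g)
  | s, g => (s, g)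

def within1 (a b : List Char) : Bool :=
  let p := stripCP a b
  let a := p.1
  let b := p.2
  if a = [] ∨ b = [] then decide (max a.length b.length ≤ 1)
  else a.tail == b || a == b.tail || a.tail == b.tail || a.tail.tail == b.tail.tail

def unwanted_words_check_alt (text : String) (unwanted_words : List String) : Bool :=
  (PySem.Str.split₀ text).any (fun word =>
    unwanted_words.any (fun w => within1 word.toList w.toList))

-- ===== PRECONDITION & SPEC =====
def Spec_unwanted_words_check (text : String) (unwanted_words : List String) (out : Bool) : Prop := out = unwanted_words_check_alt text unwanted_words
instance (text : String) (unwanted_words : List String) (out : Bool) : Decidable (Spec_unwanted_words_check text unwanted_words out) := by unfold Spec_unwanted_words_check; infer_instance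

-- ===== CLAIM (what is proved, stated in full; the proofs are below) =====
def Claim_equal_unwanted_words_check : Prop := ∀ (text : String) (unwanted_words : List String), Dom_unwanted_words_check text unwanted_words → Spec_unwanted_words_check text unwanted_words (unwanted_words_check text unwanted_words)

-- ===== LEMMAS AND PROOFS =====

-- any call of diff made with 0 ≤ tries returns at least min tries (limit+1)
lemma diffA_ge (s g : List Char) (t limit : Int) (h0 : 0 ≤ t) :
    min t (limit + 1) ≤ diffA s g t limit := by
  fun_induction diffA s g t limit
  case case1 => omega
  case case2 => omega
  case case3 => omega
  case case4 => rename_i ih; exact ih h0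
  case case5 =>
    rename_i tries limit h c s' d g' hcd ih1 ih2 ih3 ih4
    have e1 := ih1 (by omega)
    have e2 := ih2 (by omega)
    have e3 := ih3 (by omega)
    have e4 := ih4 (by omega)
    omega

-- diff on two equal strings just strips and returns tries
lemma diffA_eq_self (s : List Char) (t limit : Int) (h : t ≤ limit) :
    diffA s s t limit = t := by
  induction s with
  | nil => rw [diffA.eq_def]; simp; omega
  | cons c s' ih => rw [diffA.eq_def]; simp [show ¬ t > limit by omega, ih]

-- diff on two different strings returns at least min (tries+1) (limit+1)
lemma diffA_ne_ge (s g : List Char) (t limit : Int) (h0 : 0 ≤ t) (h : s ≠ g) :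
    min (t + 1) (limit + 1) ≤ diffA s g t limit := by
  fun_induction diffA s g t limit
  case case1 => omega
  case case2 =>
    rename_i tries limit hng g
    cases g with
    | nil => exact absurd rfl h
    | cons d g' => simp only [List.length_cons]; omega
  case case3 =>
    rename_i tries limit hng s hs
    cases s with
    | nil => exact absurd rfl h
    | cons c s' => simp only [List.length_cons]; omega
  case case4 =>
    rename_i tries limit hng s' d g' ih
    exact ih h0 (fun he => h (by rw [he]))
  case case5 =>
    rename_i tries limit hng c s' d g' hcd ih1 ih2 ih3 ih4
    have e1 := diffA_ge s' (d :: g') (tries + 1) limit (by omega)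
    have e2 := diffA_ge (c :: s') g' (tries + 1) limit (by omega)
    have e3 := diffA_ge s' g' (tries + 1) limit (by omega)
    have e4 := diffA_ge s'.tail g'.tail (tries + 1) limit (by omega)
    omega

-- diff at tries = 1 is < 2 exactly on equal strings
lemma diffA_one_lt_iff (s g : List Char) : diffA s g 1 5 < 2 ↔ s = g := by
  constructor
  · intro hlt
    by_contra hne
    have := diffA_ne_ge s g 1 5 (by omega) hne
    omega
  · intro he; subst he; rw [diffA_eq_self s 1 5 (by omega)]; omega

-- diff at tries = 0 is < 2 exactly where B's within1 holds
lemma diffA_zero_lt_iff (s g : List Char) : diffA s g 0 5 < 2 ↔ within1 s g = true := by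
  fun_induction stripCP s g
  case case1 =>
    rename_i s' d g' ih
    have hL : diffA (d :: s') (d :: g') 0 5 = diffA s' g' 0 5 := by
      rw [diffA.eq_def]; simp
    have hR : within1 (d :: s') (d :: g') = within1 s' g' := by
      simp [within1, stripCP]
    rw [hL, hR]; exact ih
  case case2 =>
    rename_i c s' d g' hcd
    have e1 := diffA_one_lt_iff s' (d :: g')
    have e2 := diffA_one_lt_iff (c :: s') g'
    have e3 := diffA_one_lt_iff s' g'
    have e4 := diffA_one_lt_iff s'.tail g'.tail
    have g1 := diffA_ge s' (d :: g') 1 5 (by omega)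
    have g2 := diffA_ge (c :: s') g' 1 5 (by omega)
    have g3 := diffA_ge s' g' 1 5 (by omega)
    have g4 := diffA_ge s'.tail g'.tail 1 5 (by omega)
    have hL : diffA (c :: s') (d :: g') 0 5
        = min (min (min (diffA s' (d :: g') 1 5) (diffA (c :: s') g' 1 5))
                   (diffA s' g' 1 5))
              (diffA s'.tail g'.tail 1 5) := by
      rw [diffA.eq_def]; simp [hcd]
    have hR : within1 (c :: s') (d :: g')
        = (s' == d :: g' || c :: s' == g' || s' == g' || s'.tail == g'.tail) := by
      simp [within1, stripCP, hcd]
    rw [hL, hR]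
    simp only [Bool.or_eq_true, beq_iff_eq]
    constructor
    · intro hlt
      have hd : diffA s' (d :: g') 1 5 < 2 ∨ diffA (c :: s') g' 1 5 < 2 ∨
          diffA s' g' 1 5 < 2 ∨ diffA s'.tail g'.tail 1 5 < 2 := by omega
      rcases hd with hx | hx | hx | hx
      · exact Or.inl (Or.inl (Or.inl (e1.mp hx)))
      · exact Or.inl (Or.inl (Or.inr (e2.mp hx)))
      · exact Or.inl (Or.inr (e3.mp hx))
      · exact Or.inr (e4.mp hx)
    · intro hb
      rcases hb with ((hx | hx) | hx) | hx
      · have := e1.mpr hx; omega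
      · have := e2.mpr hx; omega
      · have := e3.mpr hx; omega
      · have := e4.mpr hx; omega
  case case3 =>
    rename_i s g hno
    cases s with
    | nil =>
      have hL : diffA [] g 0 5 = (g.length : Int) := by
        rw [diffA.eq_def]; simp
      rw [hL, within1]
      simp [stripCP]
      try omega
    | cons c s' =>
      cases g with
      | nil =>
        have hL : diffA (c :: s') [] 0 5 = ((c :: s').length : Int) := by
          rw [diffA.eq_def]; simp
        rw [hL, within1]
        simp [stripCP]
        try omega
      | cons d g' => exact (hno c s' d g' rfl rfl).elim

-- per word: A's inner test (membership or diff < 2) agrees with B's within1 scan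
lemma inner_eq (word : String) (unwanted_words : List String) :
    (unwanted_words.contains word
      || unwanted_words.any (fun w => diffA word.toList w.toList 0 5 < 2))
    = unwanted_words.any (fun w => within1 word.toList w.toList) := by
  have hdiff : ∀ w : String,
      (decide (diffA word.toList w.toList 0 5 < 2)) = within1 word.toList w.toList := by
    intro w
    by_cases h : diffA word.toList w.toList 0 5 < 2
    · simp [h, (diffA_zero_lt_iff _ _).mp h]
    · have hw : ¬ within1 word.toList w.toList = true :=
        fun hw => h ((diffA_zero_lt_iff _ _).mpr hw)
      simp [h, hw]
  have hmem : unwanted_words.contains word = true →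
      unwanted_words.any (fun w => within1 word.toList w.toList) = true := by
    intro hc
    rw [List.contains_eq_any_beq] at hc
    rw [List.any_eq_true] at hc ⊢
    obtain ⟨w, hw, he⟩ := hc
    refine ⟨w, hw, ?_⟩
    have heq : word = w := by simpa using he
    subst heq
    rw [← diffA_zero_lt_iff]
    rw [diffA_eq_self _ 0 5 (by omega)]
    omega
  by_cases hc : unwanted_words.contains word = true
  · simp only [hc, Bool.true_or, hmem hc]
  · simp only [Bool.not_eq_true] at hc
    simp only [hc, Bool.false_or]
    congr 1
    funext w
    exact hdiff w

-- ===== VERDICT (by name: the statement is the Claim_ definition above) =====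
theorem unwanted_words_check_spec : Claim_equal_unwanted_words_check := by
  intro text unwanted_words _
  unfold Spec_unwanted_words_check unwanted_words_check unwanted_words_check_alt
  congr 1
  funext word
  exact inner_eq word unwanted_words
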